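-- pv_equiv track=rewrite | github.com/rs929/Cornell-Courses | CS1110/lab15/lab15.py | oddsevens
-- ===== SOURCE A (Python) =====
-- def oddsevens(thelist):
--     """
--     Returns a COPY of the list with odds at front, evens in the back.
--
--     Odd numbers are in the same order as thelist. Evens are reversed.
--
--     Example:
--         oddsevens([3,4,5,6]) returns [3,5,6,4].
--         oddsevens([2,3,4,5,6]) returns [3,5,6,4,2].
--         oddsevens([1,2,3,4,5,6]) returns [1,3,5,6,4,2].
--
--     Parameter thelist: The list to modify
--     Precondition: thelist is a list of ints (may be empty)
--     """
--     # HINT: How you break up the list is important.  A bad division will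
--     # make it almost impossible to combine the answer together.
--     # However, if you look at all three examples in the specification you
--     # will see a pattern that should help you define the recursion.
--     #Handle Small Data
--     if len(thelist) == 0:
--         return thelist
--     #Break into Parts
--     left = thelist[:1]
--     right = thelist[1:]
--
--     right = oddsevens(right)
--
--     if left[0] % 2 == 0:
--         return right + left
--     if left[0] % 2 != 0:
--         return left + right
-- ===== SOURCE B (Python) =====
-- def oddsevens(thelist):
--     odds = [x for x in thelist if x % 2 != 0]
--     evens = [x for x in thelist if x % 2 == 0]
--     evens.reverse()
--     return odds + evens
-- ===== Notes on version B (the rewrite author's own statement) =====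
-- stated objective: faster
-- what changed: Replaced the head-splitting recursion with per-level list concatenation by a single partition into odds and evens followed by one reverse and one concatenation.
import Mathlib
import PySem

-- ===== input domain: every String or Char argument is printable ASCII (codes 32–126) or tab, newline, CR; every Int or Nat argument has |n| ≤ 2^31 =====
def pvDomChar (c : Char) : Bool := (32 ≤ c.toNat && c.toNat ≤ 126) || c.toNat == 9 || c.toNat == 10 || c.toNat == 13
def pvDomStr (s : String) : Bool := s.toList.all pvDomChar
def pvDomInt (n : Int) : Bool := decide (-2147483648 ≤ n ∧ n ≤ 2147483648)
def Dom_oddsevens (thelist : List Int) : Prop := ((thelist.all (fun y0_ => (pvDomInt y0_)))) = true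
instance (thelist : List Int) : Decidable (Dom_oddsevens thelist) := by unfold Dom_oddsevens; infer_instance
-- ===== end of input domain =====

-- B replaces A's O(n^2) head-recursion with concatenations by a linear partition into
-- odds and evens, reversing the evens once (measured faster; asymptotic change).


-- ===== PORT A =====
-- len == 0 → return thelist; else split head [x] / tail, recurse on tail,
-- even head appended after, odd head prepended (the two Python ifs are exhaustive
-- since x % 2 ∈ {0, 1}).
def oddsevens (thelist : List Int) : List Int :=
  match thelist with
  | [] => thelist
  | x :: rest =>
    let right := oddsevens rest
    if PySem.Int.mod x 2 = 0 then right ++ [x] else [x] ++ right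

-- ===== PORT B =====
def oddsevens_alt (thelist : List Int) : List Int :=
  let odds := thelist.filter (fun x => decide (PySem.Int.mod x 2 ≠ 0))
  let evens := thelist.filter (fun x => decide (PySem.Int.mod x 2 = 0))
  odds ++ evens.reverse

-- ===== PRECONDITION & SPEC =====
def Spec_oddsevens (thelist : List Int) (out : List Int) : Prop := out = oddsevens_alt thelist
instance (thelist : List Int) (out : List Int) : Decidable (Spec_oddsevens thelist out) := by unfold Spec_oddsevens; infer_instance

-- ===== CLAIM (what is proved, stated in full; the proofs are below) =====
def Claim_equal_oddsevens : Prop := ∀ (thelist : List Int), Dom_oddsevens thelist → Spec_oddsevens thelist (oddsevens thelist)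

-- ===== LEMMAS AND PROOFS =====
theorem oddsevens_eq_alt (l : List Int) : oddsevens l = oddsevens_alt l := by
  induction l with
  | nil => rfl
  | cons x rest ih =>
    simp only [oddsevens, oddsevens_alt, List.filter_cons] at ih ⊢
    by_cases h : PySem.Int.mod x 2 = 0
    · have hd : (2 : Int) ∣ x := (PySem.Int.mod_eq_zero_iff_dvd x 2).mp h
      rw [if_pos h, ih, if_neg (by simpa using hd), if_pos (by simpa using hd)]
      simp
    · have hd : ¬ (2 : Int) ∣ x := fun d => h ((PySem.Int.mod_eq_zero_iff_dvd x 2).mpr d)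
      rw [if_neg h, ih, if_pos (by simp; omega), if_neg (by simp; omega)]
      simp

-- ===== VERDICT (by name: the statement is the Claim_ definition above) =====
theorem oddsevens_spec : Claim_equal_oddsevens := by
  intro l _
  exact oddsevens_eq_alt l
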